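-- pv_equiv track=rewrite | github.com/SuyeonSun/coding_test | 백준/Silver/1283. 단축키 지정/단축키 지정.py | assign_shortcuts
-- ===== SOURCE A (Python) =====
-- def assign_shortcuts(sentences):
--     used_shortcuts = set()  # 이미 사용된 단축키 저장
--     result = []
--
--     for sentence in sentences:
--         words = sentence.split()  # 문장을 단어 단위로 분리
--         shortcut_assigned = False
--
--         # 단축키 지정: 각 단어의 첫 글자를 먼저 시도
--         for word_index in range(len(words)):
--             word = words[word_index]
--             first_char = word[0].upper()
--             if first_char not in used_shortcuts:
--                 used_shortcuts.add(first_char)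
--                 words[word_index] = "[" + word[0] + "]" + word[1:]
--                 shortcut_assigned = True
--                 break
--
--         # 첫 글자로 단축키를 지정하지 못한 경우, 전체 문자열에서 단축키 지정
--         if not shortcut_assigned:
--             for word_index in range(len(words)):
--                 word = words[word_index]
--                 for char_index in range(len(word)):
--                     char = word[char_index].upper()
--                     if char not in used_shortcuts:
--                         used_shortcuts.add(char)
--                         words[word_index] = word[:char_index] + "[" + word[char_index] + "]" + word[char_index + 1:]
--                         shortcut_assigned = True
--                         break
--                 if shortcut_assigned:
--                     break
--
--         # 결과에 변환된 문장 추가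
--         result.append(" ".join(words))
--
--     return result
-- ===== SOURCE B (Python) =====
-- def assign_shortcuts(sentences):
--     used = set()
--     out = []
--     for sentence in sentences:
--         # work on the normalized flat sentence instead of a mutable word list
--         s = ' '.join(sentence.split())
--         hit = None
--         # phase 1: one streaming pass; a word start is any char whose predecessor is a space
--         prev = ' '
--         for i, ch in enumerate(s):
--             if prev == ' ' and ch.upper() not in used:
--                 hit = (i, ch)
--                 break
--             prev = ch
--         # phase 2: any non-space character, in order
--         if hit is None:
--             for i, ch in enumerate(s):
--                 if ch != ' ' and ch.upper() not in used:
--                     hit = (i, ch)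
--                     break
--         if hit is None:
--             out.append(s)
--         else:
--             p, ch = hit
--             used.add(ch.upper())
--             out.append(s[:p] + '[' + ch + ']' + s[p + 1:])
--     return out
-- ===== Notes on version B (the rewrite author's own statement) =====
-- stated objective: alternative
-- what changed: A mutates a list of words with two nested index loops and joins it afterwards; B first normalizes the sentence to one flat string and finds the bracket position by streaming character scans over that string (word starts detected via a previous-character accumulator), then inserts the brackets with a single slice splice - no word list, no in-place word replacement.
import Mathlib
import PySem

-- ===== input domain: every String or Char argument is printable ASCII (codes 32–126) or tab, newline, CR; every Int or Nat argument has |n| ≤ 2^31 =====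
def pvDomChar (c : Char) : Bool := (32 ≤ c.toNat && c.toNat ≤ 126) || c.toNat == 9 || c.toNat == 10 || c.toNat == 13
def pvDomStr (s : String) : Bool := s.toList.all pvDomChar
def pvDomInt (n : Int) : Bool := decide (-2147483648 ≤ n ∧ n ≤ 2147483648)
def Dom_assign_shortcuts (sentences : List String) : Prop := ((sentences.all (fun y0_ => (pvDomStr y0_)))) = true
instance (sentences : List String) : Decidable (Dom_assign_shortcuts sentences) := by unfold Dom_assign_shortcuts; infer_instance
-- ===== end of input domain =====

-- B replaces A's mutable word list with two nested index loops by streaming scans over the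
-- normalized flat sentence string and a single slice insertion (objective: alternative, no speed claim).

-- ' '.join(words) — the same normalization appears in both Pythons
def pvJoin (words : List (List Char)) : String := String.ofList (PySem.Chars.join [' '] words)

-- ===== PORT A =====
-- phase 1: 'for word_index in range(len(words)): …first char… break' with the in-place
-- words[word_index] = "[" + word[0] + "]" + word[1:]; returns some (used', words') on break, none otherwise.
-- word[0] is ported as headD ' ': split() produces only nonempty words, so it is exact here.
def aPhase1 (used : PySem.Set Char) : List (List Char) → Option (PySem.Set Char × List (List Char))
  | [] => none
  | word :: ws =>
      let first_char := PySem.Chars.upperChar (word.headD ' ')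
      if PySem.Set.contains used first_char then
        match aPhase1 used ws with
        | some (u, ws') => some (u, word :: ws')
        | none => none
      else
        some (PySem.Set.add used first_char,
              ('[' :: word.headD ' ' :: ']' :: PySem.List.slice word (some 1) none) :: ws)

-- inner loop of phase 2 over char_index of one word; word[:ci] is the consumed prefix,
-- rebuilt by the 'c :: …' reconstruction, word[ci+1:] is the remaining cs
def aInner (used : PySem.Set Char) : List Char → Option (PySem.Set Char × List Char)
  | [] => none
  | c :: cs =>
      let cu := PySem.Chars.upperChar c
      if PySem.Set.contains used cu then
        match aInner used cs with
        | some (u, cs') => some (u, c :: cs')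
        | none => none
      else
        some (PySem.Set.add used cu, '[' :: c :: ']' :: cs)

-- phase 2: outer loop over word_index with the 'if shortcut_assigned: break'
def aPhase2 (used : PySem.Set Char) : List (List Char) → Option (PySem.Set Char × List (List Char))
  | [] => none
  | word :: ws =>
      match aInner used word with
      | some (u, word') => some (u, word' :: ws)
      | none =>
        match aPhase2 used ws with
        | some (u, ws') => some (u, word :: ws')
        | none => none

-- one iteration of A's 'for sentence in sentences' body
def aSentence (used : PySem.Set Char) (sentence : String) : PySem.Set Char × String :=
  let words := (PySem.Str.split₀ sentence).map String.toList
  match aPhase1 used words with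
  | some (u, ws) => (u, pvJoin ws)
  | none =>
    match aPhase2 used words with
    | some (u, ws) => (u, pvJoin ws)
    | none => (used, pvJoin words)

def assign_shortcuts (sentences : List String) : List String :=
  (sentences.foldl
    (fun (st : PySem.Set Char × List String) sentence =>
      let r := aSentence st.1 sentence
      (r.1, st.2 ++ [r.2]))
    (PySem.Set.empty, [])).2

-- ===== PORT B =====
-- phase-1 streaming pass: 'for i, ch in enumerate(s): if prev == " " and ch.upper() not in used: hit=(i,ch); break; prev = ch'
def bFind1 (used : PySem.Set Char) (prev : Char) (i : Int) : List Char → Option (Int × Char)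
  | [] => none
  | ch :: rest =>
      if prev = ' ' ∧ ¬ PySem.Set.contains used (PySem.Chars.upperChar ch) then some (i, ch)
      else bFind1 used ch (i + 1) rest

-- phase-2 pass: 'if ch != " " and ch.upper() not in used: hit=(i,ch); break'
def bFind2 (used : PySem.Set Char) (i : Int) : List Char → Option (Int × Char)
  | [] => none
  | ch :: rest =>
      if ¬ ch = ' ' ∧ ¬ PySem.Set.contains used (PySem.Chars.upperChar ch) then some (i, ch)
      else bFind2 used (i + 1) rest

-- s[:p] + '[' + ch + ']' + s[p+1:]
def bIns (s : List Char) (p : Int) (ch : Char) : List Char :=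
  PySem.List.slice s none (some p) ++ '[' :: ch :: ']' :: PySem.List.slice s (some (p + 1)) none

-- one iteration of B's loop body
def bSentence (used : PySem.Set Char) (sentence : String) : PySem.Set Char × String :=
  let s := PySem.Chars.join [' '] ((PySem.Str.split₀ sentence).map String.toList)
  let hit := match bFind1 used ' ' 0 s with
             | some r => some r
             | none => bFind2 used 0 s
  match hit with
  | none => (used, String.ofList s)
  | some (p, ch) =>
      (PySem.Set.add used (PySem.Chars.upperChar ch), String.ofList (bIns s p ch))

def assign_shortcuts_alt (sentences : List String) : List String :=
  (sentences.foldl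
    (fun (st : PySem.Set Char × List String) sentence =>
      let r := bSentence st.1 sentence
      (r.1, st.2 ++ [r.2]))
    (PySem.Set.empty, [])).2

-- ===== PRECONDITION & SPEC =====
def Spec_assign_shortcuts (sentences : List String) (out : List String) : Prop := out = assign_shortcuts_alt sentences
instance (sentences : List String) (out : List String) : Decidable (Spec_assign_shortcuts sentences out) := by unfold Spec_assign_shortcuts; infer_instance

-- ===== CLAIM (what is proved, stated in full; the proofs are below) =====
def Claim_equal_assign_shortcuts : Prop := ∀ (sentences : List String), Dom_assign_shortcuts sentences → Spec_assign_shortcuts sentences (assign_shortcuts sentences)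

-- ===== LEMMAS AND PROOFS =====

-- words produced by split() are nonempty and whitespace-free (invariant of split₀.go)
theorem split₀_go_ok (s cur : List Char) (acc : List (List Char))
    (hacc : ∀ w ∈ acc, w ≠ [] ∧ ∀ c ∈ w, PySem.Chars.isspace c = false)
    (hcur : ∀ c ∈ cur, PySem.Chars.isspace c = false) :
    ∀ w ∈ PySem.Chars.split₀.go s cur acc, w ≠ [] ∧ ∀ c ∈ w, PySem.Chars.isspace c = false := by
  induction s generalizing cur acc with
  | nil =>
      intro w hw
      simp only [PySem.Chars.split₀.go] at hw
      split at hw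
      · exact hacc w (List.mem_reverse.mp hw)
      · rename_i hce
        rw [List.isEmpty_iff] at hce
        rw [List.mem_reverse, List.mem_cons] at hw
        rcases hw with h | h
        · subst h
          refine ⟨by simp [hce], ?_⟩
          intro c hc; exact hcur c (List.mem_reverse.mp hc)
        · exact hacc w h
  | cons c rest ih =>
      intro w hw
      simp only [PySem.Chars.split₀.go] at hw
      split at hw
      · split at hw
        · exact ih [] acc hacc (by simp) w hw
        · refine ih [] (cur.reverse :: acc) ?_ (by simp) w hw
          intro v hv
          rcases List.mem_cons.mp hv with h | h
          · subst h
            refine ⟨by simp_all, ?_⟩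
            intro d hd; exact hcur d (List.mem_reverse.mp hd)
          · exact hacc v h
      · refine ih (c :: cur) acc hacc ?_ w hw
        intro d hd
        rcases List.mem_cons.mp hd with h | h
        · subst h; simp_all
        · exact hcur d h

theorem words_ok (t : String) :
    ∀ w ∈ (PySem.Str.split₀ t).map String.toList, w ≠ [] ∧ ∀ c ∈ w, ¬ c = ' ' := by
  intro w hw
  rw [PySem.Str.split₀_map_toList] at hw
  have h := split₀_go_ok t.toList [] [] (by simp) (by simp) w hw
  refine ⟨h.1, ?_⟩
  intro c hc hsp
  have := h.2 c hc
  subst hsp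
  simp [PySem.Chars.isspace] at this

theorem drop_append_cons {α : Type} (pre : List α) (x : α) (rest : List α) :
    (pre ++ x :: rest).drop (pre.length + 1) = rest := by
  induction pre with
  | nil => simp
  | cons a t ih => simp [ih]

-- inserting the brackets at the boundary position
theorem bIns_mid (pre : List Char) (c : Char) (cs : List Char) :
    bIns (pre ++ c :: cs) (pre.length : Int) c = pre ++ '[' :: c :: ']' :: cs := by
  unfold bIns
  have h1 : ((pre.length : Int) + 1) = ((pre.length + 1 : Nat) : Int) := by push_cast; ring
  rw [h1, PySem.List.slice_to_natCast, PySem.List.slice_from_natCast, drop_append_cons]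
  simp [List.take_left']

-- the phase-1 scan walks through a space-free chunk without firing
theorem bFind1_skip (used : PySem.Set Char) (cs : List Char) (hcs : ∀ c ∈ cs, ¬ c = ' ')
    (prev : Char) (hprev : ¬ prev = ' ') (i : Int) (rest : List Char) :
    ∃ prev', ¬ prev' = ' ' ∧
      bFind1 used prev i (cs ++ rest) = bFind1 used prev' (i + (cs.length : Int)) rest := by
  induction cs generalizing prev i with
  | nil => exact ⟨prev, hprev, by simp⟩
  | cons c t ih =>
      have hc : ¬ c = ' ' := hcs c (by simp)
      obtain ⟨p', hp', hEq⟩ := ih (fun d hd => hcs d (by simp [hd])) c hc (i + 1)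
      refine ⟨p', hp', ?_⟩
      simp only [List.cons_append, bFind1, hprev, false_and, if_false]
      rw [hEq]
      congr 1
      simp only [List.length_cons]; push_cast; ring

theorem aPhase1_len (used : PySem.Set Char) (ws : List (List Char)) (u : PySem.Set Char × List (List Char))
    (h : aPhase1 used ws = some u) : u.2.length = ws.length := by
  induction ws generalizing u with
  | nil => simp [aPhase1] at h
  | cons w t ih =>
      simp only [aPhase1] at h
      split_ifs at h with hc
      · cases ht : aPhase1 used t with
        | none => rw [ht] at h; simp at h
        | some v =>
            rw [ht] at h
            obtain ⟨v1, v2⟩ := v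
            simp only [Option.some.injEq] at h
            subst h
            simpa using ih (v1, v2) ht
      · simp only [Option.some.injEq] at h
        subst h; simp

theorem aPhase2_len (used : PySem.Set Char) (ws : List (List Char)) (u : PySem.Set Char × List (List Char))
    (h : aPhase2 used ws = some u) : u.2.length = ws.length := by
  induction ws generalizing u with
  | nil => simp [aPhase2] at h
  | cons w t ih =>
      simp only [aPhase2] at h
      cases hw : aInner used w with
      | some v =>
          rw [hw] at h
          obtain ⟨v1, v2⟩ := v
          simp only [Option.some.injEq] at h
          subst h; simp
      | none =>
          rw [hw] at h
          cases ht : aPhase2 used t with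
          | none => rw [ht] at h; simp at h
          | some v =>
              rw [ht] at h
              obtain ⟨v1, v2⟩ := v
              simp only [Option.some.injEq] at h
              subst h
              simpa using ih (v1, v2) ht

-- slicing off the first character
theorem slice_one_cons {α : Type} (x : α) (xs : List α) :
    PySem.List.slice (x :: xs) (some 1) none = xs := by
  rw [show (1 : Int) = ((1 : Nat) : Int) by simp, PySem.List.slice_from_natCast]
  simp

-- A's phase 1 over the word list = B's streaming scan over the joined string
theorem phase1_eq (used : PySem.Set Char) (rest : List (List Char)) :
    ∀ (pre : List Char), (∀ w ∈ rest, w ≠ [] ∧ ∀ c ∈ w, ¬ c = ' ') →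
    (bFind1 used ' ' (pre.length : Int) (PySem.Chars.join [' '] rest)).map
        (fun q => (PySem.Set.add used (PySem.Chars.upperChar q.2),
                   bIns (pre ++ PySem.Chars.join [' '] rest) q.1 q.2))
      = (aPhase1 used rest).map (fun u => (u.1, pre ++ PySem.Chars.join [' '] u.2)) := by
  induction rest with
  | nil => intro pre hr; simp [PySem.Chars.join_nil, bFind1, aPhase1]
  | cons w ws ih =>
      intro pre hr
      obtain ⟨c, cs, rfl⟩ := List.exists_cons_of_ne_nil (hr w (by simp)).1
      have hc : ¬ c = ' ' := (hr (c :: cs) (by simp)).2 c (by simp)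
      have hcs : ∀ d ∈ cs, ¬ d = ' ' := fun d hd => (hr (c :: cs) (by simp)).2 d (by simp [hd])
      have hws : ∀ v ∈ ws, v ≠ [] ∧ ∀ d ∈ v, ¬ d = ' ' := fun v hv => hr v (by simp [hv])
      by_cases hin : PySem.Set.contains used (PySem.Chars.upperChar c) = true
      · -- the first character's shortcut is already used: B skips the whole word
        have hmem : PySem.Chars.upperChar c ∈ used := by simpa using hin
        cases ws with
        | nil =>
            rw [PySem.Chars.join_singleton]
            obtain ⟨p', hp', hskip⟩ := bFind1_skip used cs hcs c hc ((pre.length : Int) + 1) []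
            rw [List.append_nil] at hskip
            simp [bFind1, hmem, hskip, aPhase1]
        | cons w2 ws' =>
            have hJ : PySem.Chars.join [' '] ((c :: cs) :: w2 :: ws')
                = c :: (cs ++ ' ' :: PySem.Chars.join [' '] (w2 :: ws')) := by
              rw [PySem.Chars.join_cons_cons]; simp
            have hstr : pre ++ PySem.Chars.join [' '] ((c :: cs) :: w2 :: ws')
                = (pre ++ (c :: cs) ++ [' ']) ++ PySem.Chars.join [' '] (w2 :: ws') := by
              rw [hJ]; simp
            obtain ⟨p', hp', hskip⟩ :=
              bFind1_skip used cs hcs c hc ((pre.length : Int) + 1)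
                (' ' :: PySem.Chars.join [' '] (w2 :: ws'))
            have hLHS : bFind1 used ' ' (pre.length : Int)
                (c :: (cs ++ ' ' :: PySem.Chars.join [' '] (w2 :: ws')))
                = bFind1 used ' ' (((pre ++ (c :: cs) ++ [' ']).length : Nat) : Int)
                    (PySem.Chars.join [' '] (w2 :: ws')) := by
              have h1 : bFind1 used ' ' (pre.length : Int)
                  (c :: (cs ++ ' ' :: PySem.Chars.join [' '] (w2 :: ws')))
                  = bFind1 used c ((pre.length : Int) + 1)
                      (cs ++ ' ' :: PySem.Chars.join [' '] (w2 :: ws')) := by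
                simp only [bFind1]
                rw [if_neg (by simp [hmem])]
              rw [h1, hskip]
              simp only [bFind1]
              rw [if_neg (by simp [hp'])]
              congr 1
              push_cast [List.length_append, List.length_cons, List.length_nil]; ring
            rw [hstr, hJ, hLHS, ih (pre ++ (c :: cs) ++ [' ']) hws]
            have haCons : aPhase1 used ((c :: cs) :: w2 :: ws')
                = match aPhase1 used (w2 :: ws') with
                  | some (u, t) => some (u, (c :: cs) :: t)
                  | none => none := by
              simp only [aPhase1, List.headD_cons]
              rw [if_pos hin]
            rw [haCons]
            cases hA : aPhase1 used (w2 :: ws') with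
            | none => simp
            | some u =>
                obtain ⟨u1, u2⟩ := u
                have hne : u2 ≠ [] := by
                  have := aPhase1_len used (w2 :: ws') (u1, u2) hA
                  intro h; rw [h] at this; simp at this
                obtain ⟨x, xs, rfl⟩ := List.exists_cons_of_ne_nil hne
                simp [PySem.Chars.join_cons_cons]
      · -- the first character is free: both sides bracket it at the word start
        have hmem : PySem.Chars.upperChar c ∉ used := by simpa using hin
        have hfire : ∀ (tl : List Char),
            bFind1 used ' ' (pre.length : Int) (c :: tl) = some ((pre.length : Int), c) := by
          intro tl
          simp [bFind1, hmem]
        cases ws with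
        | nil =>
            rw [PySem.Chars.join_singleton]
            rw [hfire cs]
            simp only [Option.map_some, bIns_mid]
            simp [aPhase1, hmem, slice_one_cons, PySem.Chars.join_singleton]
        | cons w2 ws' =>
            have hJ : PySem.Chars.join [' '] ((c :: cs) :: w2 :: ws')
                = c :: (cs ++ ' ' :: PySem.Chars.join [' '] (w2 :: ws')) := by
              rw [PySem.Chars.join_cons_cons]; simp
            rw [hJ, hfire, Option.map_some, bIns_mid]
            simp [aPhase1, hmem, slice_one_cons, PySem.Chars.join_cons_cons]

-- the phase-2 scan over one word's characters = A's inner loop: failure case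
theorem inner_none (used : PySem.Set Char) (cs : List Char)
    (h : aInner used cs = none) (i : Int) (rest : List Char) :
    bFind2 used i (cs ++ rest) = bFind2 used (i + (cs.length : Int)) rest := by
  induction cs generalizing i with
  | nil => simp
  | cons c t ih =>
      simp only [aInner] at h
      split_ifs at h with hc
      · have ht : aInner used t = none := by
          cases ht : aInner used t with
          | none => rfl
          | some v => rw [ht] at h; obtain ⟨v1, v2⟩ := v; simp at h
        simp only [List.cons_append, bFind2, hc, not_true_eq_false, and_false, if_false]
        rw [ih ht (i + 1)]
        congr 1
        simp only [List.length_cons]; push_cast; ring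

-- the phase-2 scan over one word's characters = A's inner loop: success case
theorem inner_some (used : PySem.Set Char) (cs : List Char) (tail : List Char) :
    ∀ (pre : List Char) (u : PySem.Set Char) (cs' : List Char),
      (∀ c ∈ cs, ¬ c = ' ') → aInner used cs = some (u, cs') →
    ∃ p ch, bFind2 used (pre.length : Int) (cs ++ tail) = some (p, ch) ∧
      u = PySem.Set.add used (PySem.Chars.upperChar ch) ∧
      pre ++ cs' ++ tail = bIns (pre ++ cs ++ tail) p ch := by
  induction cs with
  | nil => intro pre u cs' hcs h; simp [aInner] at h
  | cons c t ih =>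
      intro pre u cs' hcs h
      have hc : ¬ c = ' ' := hcs c (by simp)
      simp only [aInner] at h
      split_ifs at h with hin
      · cases ht : aInner used t with
        | none => rw [ht] at h; simp at h
        | some v =>
            rw [ht] at h
            obtain ⟨v1, v2⟩ := v
            simp only [Option.some.injEq, Prod.mk.injEq] at h
            obtain ⟨hu, hcs'⟩ := h
            obtain ⟨p, ch, hfind, hu', hrec⟩ :=
              ih (pre ++ [c]) v1 v2 (fun d hd => hcs d (by simp [hd])) ht
            refine ⟨p, ch, ?_, by rw [← hu, hu'], ?_⟩
            · simp only [List.cons_append, bFind2, hin, not_true_eq_false, and_false, if_false]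
              have : (pre.length : Int) + 1 = (((pre ++ [c]).length : Nat) : Int) := by simp
              rw [this]
              simpa using hfind
            · rw [← hcs']
              simpa using hrec
      · simp only [Option.some.injEq, Prod.mk.injEq] at h
        obtain ⟨hu, hcs'⟩ := h
        refine ⟨(pre.length : Int), c, ?_, hu.symm, ?_⟩
        · have hin' : PySem.Chars.upperChar c ∉ used := by simpa using hin
          simp [List.cons_append, bFind2, hc, hin']
        · rw [← hcs']
          have := bIns_mid pre c (t ++ tail)
          simp only [List.append_assoc, List.cons_append] at *
          rw [this]
theorem phase2_eq (used : PySem.Set Char) (rest : List (List Char)) :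
    ∀ (pre : List Char), (∀ w ∈ rest, w ≠ [] ∧ ∀ c ∈ w, ¬ c = ' ') →
    (bFind2 used (pre.length : Int) (PySem.Chars.join [' '] rest)).map
        (fun q => (PySem.Set.add used (PySem.Chars.upperChar q.2),
                   bIns (pre ++ PySem.Chars.join [' '] rest) q.1 q.2))
      = (aPhase2 used rest).map (fun u => (u.1, pre ++ PySem.Chars.join [' '] u.2)) := by
  induction rest with
  | nil => intro pre hr; simp [PySem.Chars.join_nil, bFind2, aPhase2]
  | cons w ws ih =>
      intro pre hr
      have hwsp : ∀ d ∈ w, ¬ d = ' ' := (hr w (by simp)).2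
      have hws : ∀ v ∈ ws, v ≠ [] ∧ ∀ d ∈ v, ¬ d = ' ' := fun v hv => hr v (by simp [hv])
      cases hI : aInner used w with
      | some v =>
          obtain ⟨u0, w'⟩ := v
          have haCons : aPhase2 used (w :: ws) = some (u0, w' :: ws) := by
            simp only [aPhase2]; rw [hI]
          cases ws with
          | nil =>
              rw [PySem.Chars.join_singleton, haCons]
              obtain ⟨p, ch, hfind, hu, hrec⟩ := inner_some used w [] pre u0 w' hwsp hI
              rw [List.append_nil] at hfind
              simp only [List.append_nil] at hrec
              rw [hfind, Option.map_some, Option.map_some, PySem.Chars.join_singleton, hu, ← hrec]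
          | cons w2 ws' =>
              have hJ : PySem.Chars.join [' '] (w :: w2 :: ws')
                  = w ++ (' ' :: PySem.Chars.join [' '] (w2 :: ws')) := by
                rw [PySem.Chars.join_cons_cons]; simp
              have hJ' : PySem.Chars.join [' '] (w' :: w2 :: ws')
                  = w' ++ (' ' :: PySem.Chars.join [' '] (w2 :: ws')) := by
                rw [PySem.Chars.join_cons_cons]; simp
              obtain ⟨p, ch, hfind, hu, hrec⟩ :=
                inner_some used w (' ' :: PySem.Chars.join [' '] (w2 :: ws')) pre u0 w' hwsp hI
              rw [hJ, haCons, hfind, Option.map_some, Option.map_some, hJ', hu]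
              simp only [← List.append_assoc]
              rw [← hrec]
      | none =>
          have haCons : aPhase2 used (w :: ws)
              = match aPhase2 used ws with
                | some (u, t) => some (u, w :: t)
                | none => none := by
            simp only [aPhase2]; rw [hI]
          cases ws with
          | nil =>
              rw [PySem.Chars.join_singleton, haCons]
              have h0 : bFind2 used (pre.length : Int) w = none := by
                have h := inner_none used w hI (pre.length : Int) []
                rw [List.append_nil] at h
                rw [h]; simp [bFind2]
              rw [h0]; simp [aPhase2]
          | cons w2 ws' =>
              have hJ : PySem.Chars.join [' '] (w :: w2 :: ws')
                  = w ++ (' ' :: PySem.Chars.join [' '] (w2 :: ws')) := by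
                rw [PySem.Chars.join_cons_cons]; simp
              have hLHS : bFind2 used (pre.length : Int)
                  (w ++ (' ' :: PySem.Chars.join [' '] (w2 :: ws')))
                  = bFind2 used (((pre ++ w ++ [' ']).length : Nat) : Int)
                      (PySem.Chars.join [' '] (w2 :: ws')) := by
                rw [inner_none used w hI]
                simp only [bFind2]
                rw [if_neg (by simp)]
                congr 1
                push_cast [List.length_append, List.length_cons, List.length_nil]; ring
              have hstr : pre ++ PySem.Chars.join [' '] (w :: w2 :: ws')
                  = (pre ++ w ++ [' ']) ++ PySem.Chars.join [' '] (w2 :: ws') := by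
                rw [hJ]; simp
              rw [hstr, hJ, hLHS, ih (pre ++ w ++ [' ']) hws, haCons]
              cases hA : aPhase2 used (w2 :: ws') with
              | none => simp
              | some u =>
                  obtain ⟨u1, u2⟩ := u
                  have hne : u2 ≠ [] := by
                    have := aPhase2_len used (w2 :: ws') (u1, u2) hA
                    intro h; rw [h] at this; simp at this
                  obtain ⟨x, xs, rfl⟩ := List.exists_cons_of_ne_nil hne
                  simp [PySem.Chars.join_cons_cons]

-- one loop body of A = one loop body of B
theorem sentence_eq (used : PySem.Set Char) (s : String) :
    aSentence used s = bSentence used s := by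
  have h1 := phase1_eq used ((PySem.Str.split₀ s).map String.toList) [] (words_ok s)
  have h2 := phase2_eq used ((PySem.Str.split₀ s).map String.toList) [] (words_ok s)
  simp only [List.length_nil, Nat.cast_zero, List.nil_append, PySem.Str.split₀_map_toList] at h1 h2
  unfold aSentence bSentence pvJoin
  dsimp only
  simp only [PySem.Str.split₀_map_toList]
  cases hb1 : bFind1 used ' ' 0
      (PySem.Chars.join [' '] (PySem.Chars.split₀ s.toList)) with
  | some r =>
      rw [hb1] at h1
      cases ha1 : aPhase1 used (PySem.Chars.split₀ s.toList) with
      | none => rw [ha1] at h1; simp at h1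
      | some u =>
          rw [ha1] at h1
          obtain ⟨p, ch⟩ := r
          obtain ⟨u1, u2⟩ := u
          simp only [Option.map_some, Option.some.injEq, Prod.mk.injEq] at h1
          simp [h1.1, h1.2]
  | none =>
      rw [hb1] at h1
      cases ha1 : aPhase1 used (PySem.Chars.split₀ s.toList) with
      | some u => rw [ha1] at h1; simp at h1
      | none =>
          cases hb2 : bFind2 used 0
              (PySem.Chars.join [' '] (PySem.Chars.split₀ s.toList)) with
          | some r =>
              rw [hb2] at h2
              cases ha2 : aPhase2 used (PySem.Chars.split₀ s.toList) with
              | none => rw [ha2] at h2; simp at h2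
              | some u =>
                  rw [ha2] at h2
                  obtain ⟨p, ch⟩ := r
                  obtain ⟨u1, u2⟩ := u
                  simp only [Option.map_some, Option.some.injEq, Prod.mk.injEq] at h2
                  simp [h2.1, h2.2]
          | none =>
              rw [hb2] at h2
              cases ha2 : aPhase2 used (PySem.Chars.split₀ s.toList) with
              | some u => rw [ha2] at h2; simp at h2
              | none => simp

-- ===== VERDICT (by name: the statement is the Claim_ definition above) =====
theorem assign_shortcuts_spec : Claim_equal_assign_shortcuts := by
  intro sentences _
  unfold Spec_assign_shortcuts assign_shortcuts assign_shortcuts_alt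
  congr 2
  funext st sentence
  rw [sentence_eq]
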